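-- pv_equiv track=rewrite | github.com/pypi-data/pypi-mirror-249 | packages/oda-wd-client/oda_wd_client-0.0.17-py3-none-any.whl/oda_wd_client/service/human_resources/utils.py | _parse_worker_refs
-- ===== SOURCE A (Python) =====
-- from typing import Optional, Tuple
--
-- def _parse_worker_refs(refs: dict) -> Tuple[Optional[str], Optional[str]]:
--     workday_id = None
--     employee_number = None
--     for ref in refs:
--         _type = ref["_type"]
--         value = ref["value"]
--         if _type == "WID":
--             workday_id = value
--         elif _type == "Employee_ID":
--             employee_number = value
--     return workday_id, employee_number
-- ===== SOURCE B (Python) =====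
-- from typing import Optional, Tuple
--
-- def _parse_worker_refs(refs: dict) -> Tuple[Optional[str], Optional[str]]:
--     # Extract (_type, value) pairs once, then take the FIRST match scanning
--     # from the END for each wanted type (equivalent to A's last-write-wins).
--     pairs = [(ref["_type"], ref["value"]) for ref in refs]
--     workday_id = next((v for t, v in reversed(pairs) if t == "WID"), None)
--     employee_number = next((v for t, v in reversed(pairs) if t == "Employee_ID"), None)
--     return workday_id, employee_number
-- ===== Notes on version B (the rewrite author's own statement) =====
-- stated objective: alternative
-- what changed: Replaces A's single forward pass with overwrite-accumulators by a staged design: one pass extracts (_type, value) pairs, then each field is the first match of a backward scan (next over reversed), correct because the last forward overwrite is the first backward match.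
import Mathlib
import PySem

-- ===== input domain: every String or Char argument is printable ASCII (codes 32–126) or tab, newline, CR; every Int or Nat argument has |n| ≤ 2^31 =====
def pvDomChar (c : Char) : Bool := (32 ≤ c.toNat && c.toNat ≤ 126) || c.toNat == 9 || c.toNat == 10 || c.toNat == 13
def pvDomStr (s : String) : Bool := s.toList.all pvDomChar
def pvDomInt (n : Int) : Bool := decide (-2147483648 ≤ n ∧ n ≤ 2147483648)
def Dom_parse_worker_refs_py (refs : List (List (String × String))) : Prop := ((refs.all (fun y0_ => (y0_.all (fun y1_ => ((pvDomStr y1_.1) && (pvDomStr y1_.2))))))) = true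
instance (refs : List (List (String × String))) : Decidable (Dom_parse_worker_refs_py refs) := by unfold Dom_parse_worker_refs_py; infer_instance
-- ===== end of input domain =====

-- B extracts the (_type, value) pairs in one pass and takes, for each wanted type, the first
-- match of a backward scan over them, instead of A's forward overwrite-accumulator loop;
-- objective: alternative decomposition, same O(n) cost.

-- first-match lookup ref[k] with a dummy default; Pre_ guarantees the key is present, where Python would raise KeyError
def pvLook (ref : List (String × String)) (k : String) : String :=
  ((PySem.Dict.mk ref).get? k).getD ""

-- ===== PORT A =====
def parse_worker_refs_py (refs : List (List (String × String))) : Option String × Option String :=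
  refs.foldl
    (fun st ref =>
      let t := pvLook ref "_type"
      let v := pvLook ref "value"
      if t = "WID" then (some v, st.2)
      else if t = "Employee_ID" then (st.1, some v)
      else st)
    (none, none)

-- ===== PORT B =====
def parse_worker_refs_py_alt (refs : List (List (String × String))) : Option String × Option String :=
  let pairs := refs.map (fun ref => (pvLook ref "_type", pvLook ref "value"))
  ((pairs.reverse.find? (fun p => p.1 == "WID")).map (·.2),
   (pairs.reverse.find? (fun p => p.1 == "Employee_ID")).map (·.2))

-- ===== PRECONDITION & SPEC =====
-- Pre_ excludes refs lacking a "_type" or "value" key: there both Pythons raise KeyError.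
def Pre_parse_worker_refs_py (refs : List (List (String × String))) : Prop :=
  ∀ ref ∈ refs, "_type" ∈ ref.map (·.1) ∧ "value" ∈ ref.map (·.1)
instance (refs : List (List (String × String))) : Decidable (Pre_parse_worker_refs_py refs) := by unfold Pre_parse_worker_refs_py; infer_instance
def pvWitness_parse_worker_refs_py : (List (List (String × String))) :=
  [[("_type", "WID"), ("value", "w1")], [("_type", "Employee_ID"), ("value", "e7")]]
def Spec_parse_worker_refs_py (refs : List (List (String × String))) (out : Option String × Option String) : Prop := out = parse_worker_refs_py_alt refs
instance (refs : List (List (String × String))) (out : Option String × Option String) : Decidable (Spec_parse_worker_refs_py refs out) := by unfold Spec_parse_worker_refs_py; infer_instance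

-- ===== CLAIM (what is proved, stated in full; the proofs are below) =====
def Claim_equal_parse_worker_refs_py : Prop := ∀ (refs : List (List (String × String))), Dom_parse_worker_refs_py refs → Pre_parse_worker_refs_py refs → Spec_parse_worker_refs_py refs (parse_worker_refs_py refs)

-- ===== LEMMAS AND PROOFS =====

-- the pair-extraction map shared by the statements below
def pvPair (ref : List (String × String)) : String × String :=
  (pvLook ref "_type", pvLook ref "value")

-- invariant: the last forward overwrite is the first backward match
theorem pv_inv (refs : List (List (String × String))) (st : Option String × Option String) :
    refs.foldl
      (fun st ref =>
        let t := pvLook ref "_type"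
        let v := pvLook ref "value"
        if t = "WID" then (some v, st.2)
        else if t = "Employee_ID" then (st.1, some v)
        else st) st =
      ((((refs.map pvPair).reverse.find? (fun p => p.1 == "WID")).map (·.2)).or st.1,
       (((refs.map pvPair).reverse.find? (fun p => p.1 == "Employee_ID")).map (·.2)).or st.2) := by
  induction refs generalizing st with
  | nil => simp
  | cons ref rest ih =>
    simp only [List.foldl_cons, List.map_cons, List.reverse_cons, List.find?_append]
    rw [ih]
    rw [Prod.mk.injEq]
    constructor <;>
    · cases hW : (rest.map pvPair).reverse.find? (fun q => q.1 == "WID") <;>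
        cases hE : (rest.map pvPair).reverse.find? (fun q => q.1 == "Employee_ID") <;>
        simp [Option.or] <;>
        by_cases h1 : pvLook ref "_type" = "WID" <;> simp [pvPair, h1] <;>
        by_cases h2 : pvLook ref "_type" = "Employee_ID" <;> simp [h2]

-- ===== VERDICT (by name: the statement is the Claim_ definition above) =====
theorem parse_worker_refs_py_spec : Claim_equal_parse_worker_refs_py := by
  intro refs _ _
  unfold Spec_parse_worker_refs_py parse_worker_refs_py parse_worker_refs_py_alt
  rw [pv_inv]
  simp only [Option.or_none, Prod.mk.injEq]
  exact ⟨rfl, rfl⟩
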